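-- pv_equiv track=rewrite | github.com/akeenantexasfcs/L1L3combo | PRF_Analysis_Tool.py | has_adjacent_intervals
-- ===== SOURCE A (Python) =====
-- INTERVAL_ORDER_11 = ['Jan-Feb', 'Feb-Mar', 'Mar-Apr', 'Apr-May', 'May-Jun',
--                      'Jun-Jul', 'Jul-Aug', 'Aug-Sep', 'Sep-Oct', 'Oct-Nov', 'Nov-Dec']
--
-- def is_adjacent(interval1, interval2):
--     """Check if two intervals are adjacent (excluding Nov-Dec/Jan-Feb wrap)"""
--     try:
--         idx1 = INTERVAL_ORDER_11.index(interval1)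
--         idx2 = INTERVAL_ORDER_11.index(interval2)
--     except ValueError:
--         return False
--
--     diff = abs(idx1 - idx2)
--     return diff == 1
--
-- def has_adjacent_intervals(intervals_list):
--     """
--     Check if any two intervals in a list are adjacent.
--     Allows Nov-Dec and Jan-Feb together (wrap-around exception).
--     """
--     if len(intervals_list) < 2:
--         return False
--
--     for i in range(len(intervals_list)):
--         for j in range(i + 1, len(intervals_list)):
--             interval1 = intervals_list[i]
--             interval2 = intervals_list[j]
--
--             # Allow Nov-Dec and Jan-Feb together (wrap-around exception)
--             if (interval1 == 'Nov-Dec' and interval2 == 'Jan-Feb') or \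
--                (interval1 == 'Jan-Feb' and interval2 == 'Nov-Dec'):
--                 continue
--
--             if is_adjacent(interval1, interval2):
--                 return True
--
--     return False
-- ===== SOURCE B (Python) =====
-- INTERVAL_ORDER_11 = ['Jan-Feb', 'Feb-Mar', 'Mar-Apr', 'Apr-May', 'May-Jun',
--                      'Jun-Jul', 'Jul-Aug', 'Aug-Sep', 'Sep-Oct', 'Oct-Nov', 'Nov-Dec']
--
-- def has_adjacent_intervals(intervals_list):
--     # Collect the set of month-interval indices present, then test whether any
--     # two consecutive indices both occur.  The Nov-Dec/Jan-Feb "wrap exception"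
--     # of the original is a no-op (their indices differ by 10, never 1).
--     indices = {INTERVAL_ORDER_11.index(s) for s in intervals_list if s in INTERVAL_ORDER_11}
--     return any(i + 1 in indices for i in indices)
-- ===== Notes on version B (the rewrite author's own statement) =====
-- stated objective: faster
-- what changed: Replaces the nested all-pairs loop (with list.index lookups and a wrap-around special case) by building the set of interval indices once and testing whether any index i has i+1 in the set.
import Mathlib
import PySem

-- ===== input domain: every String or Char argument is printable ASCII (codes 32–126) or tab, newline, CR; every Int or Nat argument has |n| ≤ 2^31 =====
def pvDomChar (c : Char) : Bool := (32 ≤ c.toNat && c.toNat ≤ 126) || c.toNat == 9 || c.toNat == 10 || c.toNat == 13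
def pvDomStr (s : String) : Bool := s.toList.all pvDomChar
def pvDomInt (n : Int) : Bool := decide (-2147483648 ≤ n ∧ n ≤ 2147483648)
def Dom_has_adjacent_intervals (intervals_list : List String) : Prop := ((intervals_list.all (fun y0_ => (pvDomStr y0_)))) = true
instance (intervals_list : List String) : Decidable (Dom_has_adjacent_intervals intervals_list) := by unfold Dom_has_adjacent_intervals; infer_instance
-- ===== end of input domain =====

-- B builds the set of interval indices once and scans it for a consecutive pair,
-- replacing A's nested all-pairs comparison (objective: faster, one pass instead of nested passes).


-- ===== PORT A =====
def INTERVAL_ORDER_11 : List String :=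
  ["Jan-Feb", "Feb-Mar", "Mar-Apr", "Apr-May", "May-Jun",
   "Jun-Jul", "Jul-Aug", "Aug-Sep", "Sep-Oct", "Oct-Nov", "Nov-Dec"]

-- try/except ValueError: index? is none exactly where Python's .index raises
def is_adjacent (interval1 interval2 : String) : Bool :=
  match PySem.List.index? INTERVAL_ORDER_11 interval1,
        PySem.List.index? INTERVAL_ORDER_11 interval2 with
  | some idx1, some idx2 => ((idx1 : Int) - (idx2 : Int)).natAbs == 1
  | _, _ => false

-- inner 'for j in range(i+1, len(...))' loop: interval2 runs over the suffix after i
def hasAdjLoopJ (interval1 : String) : List String → Bool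
  | [] => false
  | interval2 :: rest =>
    if (interval1 == "Nov-Dec" && interval2 == "Jan-Feb")
       || (interval1 == "Jan-Feb" && interval2 == "Nov-Dec") then
      hasAdjLoopJ interval1 rest          -- continue
    else if is_adjacent interval1 interval2 then
      true                                -- return True
    else
      hasAdjLoopJ interval1 rest

-- outer 'for i in range(len(...))' loop
def hasAdjLoopI : List String → Bool
  | [] => false
  | interval1 :: rest =>
    if hasAdjLoopJ interval1 rest then true else hasAdjLoopI rest

def has_adjacent_intervals (intervals_list : List String) : Bool :=
  if intervals_list.length < 2 then false
  else hasAdjLoopI intervals_list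

-- ===== PORT B =====
-- {INTERVAL_ORDER_11.index(s) for s in intervals_list if s in INTERVAL_ORDER_11}:
-- index? is some exactly when the membership guard holds, so the guarded comprehension is filterMap
def has_adjacent_intervals_alt (intervals_list : List String) : Bool :=
  let indices : PySem.Set Int :=
    PySem.Set.ofList (intervals_list.filterMap
      (fun s => (PySem.List.index? INTERVAL_ORDER_11 s).map (fun k => (k : Int))))
  indices.any (fun i => PySem.Set.contains indices (i + 1))

-- ===== PRECONDITION & SPEC =====
def Spec_has_adjacent_intervals (intervals_list : List String) (out : Bool) : Prop := out = has_adjacent_intervals_alt intervals_list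
instance (intervals_list : List String) (out : Bool) : Decidable (Spec_has_adjacent_intervals intervals_list out) := by unfold Spec_has_adjacent_intervals; infer_instance

-- ===== CLAIM (what is proved, stated in full; the proofs are below) =====
def Claim_equal_has_adjacent_intervals : Prop := ∀ (intervals_list : List String), Dom_has_adjacent_intervals intervals_list → Spec_has_adjacent_intervals intervals_list (has_adjacent_intervals intervals_list)

-- ===== LEMMAS AND PROOFS =====

-- the indices of the list's members in INTERVAL_ORDER_11, as Ints
def pvIdxs (l : List String) : List Int :=
  l.filterMap (fun s => (PySem.List.index? INTERVAL_ORDER_11 s).map (fun k => (k : Int)))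

theorem is_adjacent_iff (x y : String) :
    is_adjacent x y = true ↔
      ∃ ix iy : Nat, PySem.List.index? INTERVAL_ORDER_11 x = some ix ∧
        PySem.List.index? INTERVAL_ORDER_11 y = some iy ∧ ((ix : Int) - iy).natAbs = 1 := by
  unfold is_adjacent
  cases hx : PySem.List.index? INTERVAL_ORDER_11 x <;>
    cases hy : PySem.List.index? INTERVAL_ORDER_11 y <;> simp

theorem is_adjacent_symm (x y : String) : is_adjacent x y = is_adjacent y x := by
  unfold is_adjacent
  cases hx : PySem.List.index? INTERVAL_ORDER_11 x <;>
    cases hy : PySem.List.index? INTERVAL_ORDER_11 y <;> simp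
  omega

theorem is_adjacent_irrefl (x : String) : is_adjacent x x = false := by
  unfold is_adjacent
  cases hx : PySem.List.index? INTERVAL_ORDER_11 x <;> simp

-- the wrap-around 'continue' is a no-op: those two intervals are never adjacent
theorem loopJ_eq_any (x : String) (ys : List String) :
    hasAdjLoopJ x ys = ys.any (fun y => is_adjacent x y) := by
  induction ys with
  | nil => rfl
  | cons y rest ih =>
    simp only [hasAdjLoopJ, List.any_cons]
    split_ifs with hwrap hadj
    · have h1 : (x == "Nov-Dec" && y == "Jan-Feb") || (x == "Jan-Feb" && y == "Nov-Dec") := hwrap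
      have hx : (x = "Nov-Dec" ∧ y = "Jan-Feb") ∨ (x = "Jan-Feb" ∧ y = "Nov-Dec") := by
        simpa using h1
      have hfalse : is_adjacent x y = false := by
        rcases hx with ⟨hx1, hy1⟩ | ⟨hx1, hy1⟩ <;> subst hx1 <;> subst hy1 <;> decide
      simp [hfalse, ih]
    · simp [hadj]
    · simp [hadj, ih]

theorem loopI_iff (l : List String) :
    hasAdjLoopI l = true ↔ ∃ x ∈ l, ∃ y ∈ l, is_adjacent x y = true := by
  induction l with
  | nil => simp [hasAdjLoopI]
  | cons a rest ih =>
    simp only [hasAdjLoopI, loopJ_eq_any]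
    constructor
    · intro h
      split_ifs at h with hj
      · rcases (List.any_eq_true).mp hj with ⟨y, hy, hadj⟩
        exact ⟨a, by simp, y, by simp [hy], hadj⟩
      · rcases ih.mp h with ⟨x, hx, y, hy, hadj⟩
        exact ⟨x, by simp [hx], y, by simp [hy], hadj⟩
    · rintro ⟨x, hx, y, hy, hadj⟩
      rcases List.mem_cons.mp hx with hxa | hxr <;> rcases List.mem_cons.mp hy with hya | hyr
      · exfalso; subst hxa; subst hya; simp [is_adjacent_irrefl] at hadj
      · subst hxa
        have h1 : rest.any (fun z => is_adjacent x z) = true :=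
          List.any_eq_true.mpr ⟨y, hyr, hadj⟩
        simp [h1]
      · subst hya
        have h1 : rest.any (fun z => is_adjacent y z) = true :=
          List.any_eq_true.mpr ⟨x, hxr, by rw [← is_adjacent_symm]; exact hadj⟩
        simp [h1]
      · have h1 := ih.mpr ⟨x, hxr, y, hyr, hadj⟩
        split_ifs <;> simp [h1]

theorem A_iff (l : List String) :
    has_adjacent_intervals l = true ↔ ∃ x ∈ l, ∃ y ∈ l, is_adjacent x y = true := by
  unfold has_adjacent_intervals
  split_ifs with hlen
  · rw [← loopI_iff]
    match l, hlen with
    | [], _ => simp [hasAdjLoopI]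
    | [x], _ => simp [hasAdjLoopI, hasAdjLoopJ]
  · exact loopI_iff l

theorem B_iff (l : List String) :
    has_adjacent_intervals_alt l = true ↔ ∃ i, i ∈ pvIdxs l ∧ (i + 1) ∈ pvIdxs l := by
  unfold has_adjacent_intervals_alt
  simp only [List.any_eq_true, PySem.Set.contains_iff, PySem.Set.mem_ofList]
  rfl

theorem mem_pvIdxs (l : List String) (i : Int) :
    i ∈ pvIdxs l ↔ ∃ s ∈ l, ∃ k : Nat, PySem.List.index? INTERVAL_ORDER_11 s = some k ∧ i = (k : Int) := by
  unfold pvIdxs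
  constructor
  · intro h
    rcases List.mem_filterMap.mp h with ⟨s, hs, hmap⟩
    cases hidx : PySem.List.index? INTERVAL_ORDER_11 s with
    | none => rw [hidx] at hmap; simp at hmap
    | some k =>
      rw [hidx] at hmap
      simp at hmap
      exact ⟨s, hs, k, hidx, hmap.symm⟩
  · rintro ⟨s, hs, k, hk, rfl⟩
    refine List.mem_filterMap.mpr ⟨s, hs, ?_⟩
    rw [hk]
    rfl

theorem bridge (l : List String) :
    (∃ x ∈ l, ∃ y ∈ l, is_adjacent x y = true) ↔ ∃ i, i ∈ pvIdxs l ∧ (i + 1) ∈ pvIdxs l := by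
  constructor
  · rintro ⟨x, hx, y, hy, hadj⟩
    rcases (is_adjacent_iff x y).mp hadj with ⟨ix, iy, hix, hiy, hd⟩
    have hxm : (ix : Int) ∈ pvIdxs l := (mem_pvIdxs l _).mpr ⟨x, hx, ix, hix, rfl⟩
    have hym : (iy : Int) ∈ pvIdxs l := (mem_pvIdxs l _).mpr ⟨y, hy, iy, hiy, rfl⟩
    have : (iy : Int) = (ix : Int) + 1 ∨ (ix : Int) = (iy : Int) + 1 := by omega
    rcases this with h | h
    · exact ⟨(ix : Int), hxm, h ▸ hym⟩
    · exact ⟨(iy : Int), hym, h ▸ hxm⟩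
  · rintro ⟨i, hi, hi1⟩
    rcases (mem_pvIdxs l i).mp hi with ⟨x, hx, ix, hix, hexi⟩
    rcases (mem_pvIdxs l (i + 1)).mp hi1 with ⟨y, hy, iy, hiy, heyi⟩
    refine ⟨x, hx, y, hy, (is_adjacent_iff x y).mpr ⟨ix, iy, hix, hiy, by omega⟩⟩

-- ===== VERDICT (by name: the statement is the Claim_ definition above) =====
theorem has_adjacent_intervals_spec : Claim_equal_has_adjacent_intervals := by
  intro l _
  unfold Spec_has_adjacent_intervals
  have h := (A_iff l).trans ((bridge l).trans (B_iff l).symm)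
  cases hA : has_adjacent_intervals l <;> cases hB : has_adjacent_intervals_alt l <;>
    simp_all
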